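-- pv_equiv track=rewrite | github.com/darinvi/MarketDataPrep | corp_finance/data_preparation.py | close_held_open_rate
-- ===== SOURCE A (Python) =====
-- def close_held_open_rate(lst:list):
--     for i in range(len(lst)):
--         close_held_open = 0
--         if i >= 100:
--             for j in range(1,101):
--                 gap, close, open = lst[i-j][7], lst[i-j][6], lst[i-j][3]
--                 if (gap > 0 and close >= open) or (gap < 0 and close <= open):
--                     close_held_open += 1
--         lst[i].append(close_held_open)
--     return lst
-- ===== SOURCE B (Python) =====
-- def close_held_open_rate(lst: list):
--     n = len(lst)
--     sums = [0]
--     s = 0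
--     if n > 100:
--         for row in lst[:-1]:
--             gap, close, open_ = row[7], row[6], row[3]
--             if (gap > 0 and close >= open_) or (gap < 0 and close <= open_):
--                 s += 1
--             sums.append(s)
--     for i, row in enumerate(lst):
--         row.append(sums[i] - sums[i - 100] if i >= 100 else 0)
--     return lst
-- ===== Notes on version B (the rewrite author's own statement) =====
-- stated objective: alternative
-- what changed: Replaces the inner re-scan of the previous 100 rows with a single pass computing per-row condition flags and their running prefix sums, so each row's count is a difference of two prefix sums.
import Mathlib
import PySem

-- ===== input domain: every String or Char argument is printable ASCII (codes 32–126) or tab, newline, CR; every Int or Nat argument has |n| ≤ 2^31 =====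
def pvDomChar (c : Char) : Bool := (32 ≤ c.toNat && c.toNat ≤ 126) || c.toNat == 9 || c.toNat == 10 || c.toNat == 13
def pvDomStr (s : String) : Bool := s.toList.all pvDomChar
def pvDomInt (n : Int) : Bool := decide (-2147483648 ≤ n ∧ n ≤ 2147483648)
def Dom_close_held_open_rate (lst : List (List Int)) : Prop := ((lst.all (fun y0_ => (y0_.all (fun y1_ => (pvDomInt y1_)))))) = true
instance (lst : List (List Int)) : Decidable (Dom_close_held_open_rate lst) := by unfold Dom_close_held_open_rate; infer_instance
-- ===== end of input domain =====

-- B replaces A's 100-element re-scan of the preceding rows per row by per-row flags and running prefix sums (one pass; a different algorithm, not claimed faster).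
-- A mutates lst in place (appends one count to every row) and returns it; B performs the same in-place append — the theorems are about the return value.

-- ===== PORT A =====
def close_held_open_rate (lst : List (List Int)) : List (List Int) :=
  (PySem.List.pyRange 0 lst.length 1).foldl (fun st i =>
    let c : Int :=
      if 100 ≤ i then
        (PySem.List.pyRange 1 101 1).foldl (fun acc j =>
          let row := PySem.List.pyGetD st (i - j) []
          let gap := PySem.List.pyGetD row 7 0
          let close := PySem.List.pyGetD row 6 0
          let opn := PySem.List.pyGetD row 3 0
          if (gap > 0 ∧ close ≥ opn) ∨ (gap < 0 ∧ close ≤ opn) then acc + 1 else acc) 0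
      else 0
    st.set i.toNat (PySem.List.pyGetD st i [] ++ [c])) lst

-- ===== PORT B =====
def close_held_open_rate_alt (lst : List (List Int)) : List (List Int) :=
  let n : Int := lst.length
  let ps : List Int × Int :=
    if 100 < n then
      lst.dropLast.foldl (fun (acc : List Int × Int) row =>
        let gap := PySem.List.pyGetD row 7 0
        let close := PySem.List.pyGetD row 6 0
        let opn := PySem.List.pyGetD row 3 0
        let s := if (gap > 0 ∧ close ≥ opn) ∨ (gap < 0 ∧ close ≤ opn) then acc.2 + 1 else acc.2
        (acc.1 ++ [s], s)) ([0], 0)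
    else ([0], 0)
  let sums := ps.1
  (PySem.List.enumerate lst 0).map (fun p =>
    p.2 ++ [if 100 ≤ p.1 then PySem.List.pyGetD sums p.1 0 - PySem.List.pyGetD sums (p.1 - 100) 0 else 0])

-- ===== PRECONDITION & SPEC =====
-- Pre_ excludes lists longer than 100 rows in which some non-final row has fewer than 8 fields: there
-- A raises IndexError when such a row has fewer than 7 fields, and when it has exactly 7 A returns a value
-- that accidentally reads the counter A itself appended to that row (B raises IndexError in both cases).
def Pre_close_held_open_rate (lst : List (List Int)) : Prop :=
  lst.length ≤ 100 ∨ ∀ row ∈ lst.dropLast, 8 ≤ row.length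
instance (lst : List (List Int)) : Decidable (Pre_close_held_open_rate lst) := by unfold Pre_close_held_open_rate; infer_instance

def pvWitness_close_held_open_rate : List (List Int) := [[1, 2, 3, 4, 5, 6, 7, 8]]

def Spec_close_held_open_rate (lst : List (List Int)) (out : List (List Int)) : Prop := out = close_held_open_rate_alt lst
instance (lst : List (List Int)) (out : List (List Int)) : Decidable (Spec_close_held_open_rate lst out) := by unfold Spec_close_held_open_rate; infer_instance

-- ===== CLAIM (what is proved, stated in full; the proofs are below) =====
def Claim_equal_close_held_open_rate : Prop := ∀ (lst : List (List Int)), Dom_close_held_open_rate lst → Pre_close_held_open_rate lst → Spec_close_held_open_rate lst (close_held_open_rate lst)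

-- ===== LEMMAS AND PROOFS =====

-- the per-row condition of both programs, as a 0/1 flag
def pvFlag (row : List Int) : Int :=
  if (PySem.List.pyGetD row 7 0 > 0 ∧ PySem.List.pyGetD row 6 0 ≥ PySem.List.pyGetD row 3 0) ∨
     (PySem.List.pyGetD row 7 0 < 0 ∧ PySem.List.pyGetD row 6 0 ≤ PySem.List.pyGetD row 3 0) then 1 else 0

-- the count appended to row i, stated over the ORIGINAL list
def pvCnt (lst : List (List Int)) (i : Int) : Int :=
  if 100 ≤ i then ((PySem.List.pyRange (i - 100) i 1).map (fun m => pvFlag (PySem.List.pyGetD lst m []))).sum else 0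

-- common intermediate form: row i gets pvCnt appended
def pvSpecList (lst : List (List Int)) : List (List Int) :=
  (PySem.List.enumerate lst 0).map (fun p => p.2 ++ [pvCnt lst p.1])

-- state of A's outer loop after k iterations
def pvSpecUpTo (lst : List (List Int)) (k : Nat) : List (List Int) :=
  (PySem.List.enumerate (lst.take k) 0).map (fun p => p.2 ++ [pvCnt lst p.1]) ++ lst.drop k

-- the body of A's outer loop (identical to the lambda in the port of A)
def pvStepA (st : List (List Int)) (i : Int) : List (List Int) :=
  let c : Int :=
    if 100 ≤ i then
      (PySem.List.pyRange 1 101 1).foldl (fun acc j =>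
        let row := PySem.List.pyGetD st (i - j) []
        let gap := PySem.List.pyGetD row 7 0
        let close := PySem.List.pyGetD row 6 0
        let opn := PySem.List.pyGetD row 3 0
        if (gap > 0 ∧ close ≥ opn) ∨ (gap < 0 ∧ close ≤ opn) then acc + 1 else acc) 0
    else 0
  st.set i.toNat (PySem.List.pyGetD st i [] ++ [c])

lemma A_unfold (lst : List (List Int)) :
    close_held_open_rate lst = (PySem.List.pyRange 0 lst.length 1).foldl pvStepA lst := rfl

-- A's inner counting loop as a sum of flags (stated in zeta-reduced form)
lemma pv_inner_fold (st : List (List Int)) (i : Int) (l : List Int) (acc : Int) :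
    l.foldl (fun acc j =>
        if (PySem.List.pyGetD (PySem.List.pyGetD st (i - j) []) 7 0 > 0 ∧
              PySem.List.pyGetD (PySem.List.pyGetD st (i - j) []) 6 0 ≥
                PySem.List.pyGetD (PySem.List.pyGetD st (i - j) []) 3 0) ∨
           (PySem.List.pyGetD (PySem.List.pyGetD st (i - j) []) 7 0 < 0 ∧
              PySem.List.pyGetD (PySem.List.pyGetD st (i - j) []) 6 0 ≤
                PySem.List.pyGetD (PySem.List.pyGetD st (i - j) []) 3 0)
        then acc + 1 else acc) acc
      = acc + (l.map (fun j => pvFlag (PySem.List.pyGetD st (i - j) []))).sum := by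
  induction l generalizing acc with
  | nil => simp
  | cons h t ih =>
    simp only [List.foldl_cons, List.map_cons, List.sum_cons, ih]
    unfold pvFlag
    split <;> ring

lemma pvFlag_append (row : List Int) (x : Int) (h : 8 ≤ row.length) :
    pvFlag (row ++ [x]) = pvFlag row := by
  have e : ∀ k : Nat, k < row.length →
      PySem.List.pyGetD (row ++ [x]) (k : Int) 0 = PySem.List.pyGetD row (k : Int) 0 := by
    intro k hk
    rw [PySem.List.pyGetD_eq_getElem _ _ (by positivity) (by simp; omega),
        PySem.List.pyGetD_eq_getElem _ _ (by positivity) (by exact_mod_cast hk)]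
    simp only [Int.toNat_natCast]
    rw [List.getElem_append_left hk]
  unfold pvFlag
  rw [show ((7 : Int)) = ((7 : Nat) : Int) by norm_num,
      show ((6 : Int)) = ((6 : Nat) : Int) by norm_num,
      show ((3 : Int)) = ((3 : Nat) : Int) by norm_num,
      e 7 (by omega), e 6 (by omega), e 3 (by omega)]

-- summing g over j=1..c with argument k-j, reindexed as m=k-c..k-1
lemma pv_sum_rev (g : Int → Int) (k : Int) : ∀ (c : Nat),
    ((PySem.List.pyRange 1 ((c : Int) + 1) 1).map (fun j => g (k - j))).sum
      = ((PySem.List.pyRange (k - (c : Int)) k 1).map g).sum := by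
  intro c
  induction c with
  | zero => simp [PySem.List.pyRange_one_eq_nil]
  | succ c ih =>
    rw [show (((c + 1 : Nat) : Int) + 1) = ((c : Int) + 1) + 1 by push_cast; ring,
        PySem.List.pyRange_one_succ_right (by omega),
        List.map_append, List.sum_append, ih,
        show (k - ((c + 1 : Nat) : Int)) = (k - (c : Int)) - 1 by push_cast; ring,
        show PySem.List.pyRange (k - (c : Int) - 1) k 1
            = (k - (c : Int) - 1) :: PySem.List.pyRange (k - (c : Int) - 1 + 1) k 1
          from PySem.List.pyRange_one_cons (by omega)]
    simp only [List.map_cons, List.sum_cons, List.map_nil, List.sum_nil]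
    rw [show k - (c : Int) - 1 + 1 = k - (c : Int) by ring,
        show k - ((c : Int) + 1) = k - (c : Int) - 1 by ring]
    ring

-- sum over an index segment equals a difference of prefix sums
lemma pv_sum_take (ys : List (List Int)) : ∀ (b : Nat), b ≤ ys.length → ∀ (a : Nat), a ≤ b →
    ((PySem.List.pyRange (a : Int) (b : Int) 1).map (fun m => pvFlag (PySem.List.pyGetD ys m []))).sum
      = ((ys.take b).map pvFlag).sum - ((ys.take a).map pvFlag).sum := by
  intro b
  induction b with
  | zero =>
    intro _ a ha
    have : a = 0 := by omega
    subst this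
    simp [PySem.List.pyRange_one_eq_nil]
  | succ b ih =>
    intro hb a ha
    by_cases hab : a = b + 1
    · subst hab; simp [PySem.List.pyRange_one_eq_nil]
    · have ha' : a ≤ b := by omega
      have hblen : b < ys.length := by omega
      rw [show ((b + 1 : Nat) : Int) = (b : Int) + 1 by push_cast; ring,
          PySem.List.pyRange_one_succ_right (by exact_mod_cast ha'),
          List.map_append, List.sum_append, ih (by omega) a ha']
      have hget : PySem.List.pyGetD ys (b : Int) [] = ys[b] := by
        rw [PySem.List.pyGetD_eq_getElem _ _ (by positivity) (by exact_mod_cast hblen)]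
        simp
      rw [List.take_add_one, List.getElem?_eq_getElem hblen]
      simp only [Option.toList_some, List.map_append, List.sum_append, List.map_cons,
        List.map_nil, List.sum_cons, List.sum_nil, hget]
      ring

-- tail step used by the prefix-sum characterisation
lemma pv_sums_tail (acc : List Int) (s x : Int) (r : List Int) (t : List (List Int))
    (hx : x = s + pvFlag r) :
    (acc ++ [x]) ++ (List.range t.length).map (fun k => x + ((t.take (k + 1)).map pvFlag).sum)
      = acc ++ (List.range (t.length + 1)).map
          (fun k => s + (((r :: t).take (k + 1)).map pvFlag).sum) := by
  subst hx
  simp only [List.range_succ_eq_map, List.map_cons, List.map_map, List.append_assoc,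
    List.singleton_append]
  congr 1
  congr 1
  · simp
  · apply List.map_congr_left
    intro k _
    simp only [Function.comp_apply, Nat.succ_eq_add_one, List.take_succ_cons, List.map_cons,
      List.sum_cons]
    ring

-- characterisation of B's prefix-sum building loop (stated in zeta-reduced form)
lemma pv_sums_char (xs : List (List Int)) : ∀ (acc : List Int) (s : Int),
    (xs.foldl (fun (acc : List Int × Int) row =>
        (acc.1 ++ [if (PySem.List.pyGetD row 7 0 > 0 ∧
              PySem.List.pyGetD row 6 0 ≥ PySem.List.pyGetD row 3 0) ∨
            (PySem.List.pyGetD row 7 0 < 0 ∧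
              PySem.List.pyGetD row 6 0 ≤ PySem.List.pyGetD row 3 0)
          then acc.2 + 1 else acc.2],
         if (PySem.List.pyGetD row 7 0 > 0 ∧
              PySem.List.pyGetD row 6 0 ≥ PySem.List.pyGetD row 3 0) ∨
            (PySem.List.pyGetD row 7 0 < 0 ∧
              PySem.List.pyGetD row 6 0 ≤ PySem.List.pyGetD row 3 0)
          then acc.2 + 1 else acc.2)) (acc, s)).1
      = acc ++ (List.range xs.length).map (fun k => s + ((xs.take (k + 1)).map pvFlag).sum) := by
  induction xs with
  | nil => intro acc s; simp
  | cons r t ih =>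
    intro acc s
    by_cases hC : (PySem.List.pyGetD r 7 0 > 0 ∧
          PySem.List.pyGetD r 6 0 ≥ PySem.List.pyGetD r 3 0) ∨
        (PySem.List.pyGetD r 7 0 < 0 ∧
          PySem.List.pyGetD r 6 0 ≤ PySem.List.pyGetD r 3 0)
    · simp only [List.foldl_cons, hC, if_pos]
      rw [ih, List.length_cons]
      exact pv_sums_tail acc s (s + 1) r t (by unfold pvFlag; rw [if_pos hC])
    · simp only [List.foldl_cons, hC, ite_false]
      rw [ih, List.length_cons]
      exact pv_sums_tail acc s s r t (by unfold pvFlag; rw [if_neg hC]; ring)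

-- B's sums list, as a map of prefix sums
lemma pv_sums_eq (lst : List (List Int)) (h : 100 < lst.length) :
    [(0 : Int)] ++ (List.range lst.dropLast.length).map
        (fun k => (0 : Int) + ((lst.dropLast.take (k + 1)).map pvFlag).sum)
      = (List.range lst.length).map (fun k => ((lst.dropLast.take k).map pvFlag).sum) := by
  have hlen : lst.length = lst.dropLast.length + 1 := by
    rw [List.length_dropLast]; omega
  rw [hlen, List.range_succ_eq_map, List.map_cons, List.map_map]
  simp [Function.comp]

-- pvCnt as a difference of prefix sums over dropLast
lemma pv_cnt_eq (lst : List (List Int)) (k : Nat) (h100 : 100 ≤ k) (hk : k < lst.length) :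
    pvCnt lst (k : Int)
      = ((lst.dropLast.take k).map pvFlag).sum - ((lst.dropLast.take (k - 100)).map pvFlag).sum := by
  have hdl : lst.dropLast.length = lst.length - 1 := by simp
  unfold pvCnt
  rw [if_pos (by exact_mod_cast h100)]
  have hswap : ((PySem.List.pyRange ((k : Int) - 100) (k : Int) 1).map
        (fun m => pvFlag (PySem.List.pyGetD lst m []))).sum
      = ((PySem.List.pyRange ((k : Int) - 100) (k : Int) 1).map
        (fun m => pvFlag (PySem.List.pyGetD lst.dropLast m []))).sum := by
    congr 1
    apply List.map_congr_left
    intro m hm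
    rw [PySem.List.mem_pyRange_one] at hm
    have h0 : 0 ≤ m := by omega
    rw [PySem.List.pyGetD_eq_getElem _ _ h0 (by omega),
        PySem.List.pyGetD_eq_getElem _ _ h0 (by omega)]
    congr 1
    rw [List.getElem_dropLast]
  rw [hswap,
      show ((k : Int) - 100) = (((k - 100 : Nat)) : Int) by omega,
      pv_sum_take lst.dropLast k (by omega) (k - 100) (by omega)]

-- one step of A's outer loop advances the invariant
lemma pvStepA_spec (lst : List (List Int)) (hpre : Pre_close_held_open_rate lst)
    (k : Nat) (hk : k < lst.length) :
    pvStepA (pvSpecUpTo lst k) (k : Int) = pvSpecUpTo lst (k + 1) := by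
  have hPlen : ((PySem.List.enumerate (lst.take k) 0).map
      (fun p => p.2 ++ [pvCnt lst p.1])).length = k := by
    simp [PySem.List.length_enumerate]
    omega
  have hgetst : ∀ (m : Int) (_h0 : 0 ≤ m) (_hmk : m.toNat < k),
      PySem.List.pyGetD (pvSpecUpTo lst k) m []
        = lst[m.toNat]'(by omega) ++ [pvCnt lst ((m.toNat : Nat) : Int)] := by
    intro m h0 hmk
    unfold pvSpecUpTo
    rw [PySem.List.pyGetD_eq_getElem _ _ h0
          (by rw [List.length_append, hPlen, List.length_drop]; omega),
        List.getElem_append_left (by rw [hPlen]; exact hmk),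
        List.getElem_map, PySem.List.getElem_enumerate]
    simp [List.getElem_take]
  have hgetk : PySem.List.pyGetD (pvSpecUpTo lst k) (k : Int) [] = lst[k] := by
    unfold pvSpecUpTo
    rw [PySem.List.pyGetD_eq_getElem _ _ (by positivity)
          (by rw [List.length_append, hPlen, List.length_drop]; omega)]
    simp only [Int.toNat_natCast]
    rw [List.getElem_append_right (by rw [hPlen])]
    simp [hPlen, List.getElem_drop]
  have hc : (if 100 ≤ (k : Int) then
      (PySem.List.pyRange 1 101 1).foldl (fun acc j =>
        if (PySem.List.pyGetD (PySem.List.pyGetD (pvSpecUpTo lst k) ((k : Int) - j) []) 7 0 > 0 ∧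
              PySem.List.pyGetD (PySem.List.pyGetD (pvSpecUpTo lst k) ((k : Int) - j) []) 6 0 ≥
                PySem.List.pyGetD (PySem.List.pyGetD (pvSpecUpTo lst k) ((k : Int) - j) []) 3 0) ∨
           (PySem.List.pyGetD (PySem.List.pyGetD (pvSpecUpTo lst k) ((k : Int) - j) []) 7 0 < 0 ∧
              PySem.List.pyGetD (PySem.List.pyGetD (pvSpecUpTo lst k) ((k : Int) - j) []) 6 0 ≤
                PySem.List.pyGetD (PySem.List.pyGetD (pvSpecUpTo lst k) ((k : Int) - j) []) 3 0)
        then acc + 1 else acc) 0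
      else 0) = pvCnt lst (k : Int) := by
    by_cases h100 : (100 : Int) ≤ (k : Int)
    · have hk100 : 100 ≤ k := by exact_mod_cast h100
      have hrows : ∀ row ∈ lst.dropLast, 8 ≤ row.length := hpre.resolve_left (by omega)
      rw [if_pos h100, pv_inner_fold, zero_add,
          show (101 : Int) = ((100 : Nat) : Int) + 1 by norm_num,
          pv_sum_rev (fun m => pvFlag (PySem.List.pyGetD (pvSpecUpTo lst k) m [])) (k : Int) 100]
      unfold pvCnt
      rw [if_pos h100, show (((100 : Nat) : Int)) = (100 : Int) by norm_num]
      congr 1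
      apply List.map_congr_left
      intro m hm
      rw [PySem.List.mem_pyRange_one] at hm
      have h0 : 0 ≤ m := by omega
      have hmk : m.toNat < k := by omega
      have hmlast : m.toNat < lst.length - 1 := by omega
      rw [hgetst m h0 hmk,
          PySem.List.pyGetD_eq_getElem lst _ h0 (by omega),
          pvFlag_append]
      have h8 : 8 ≤ (lst.dropLast[m.toNat]'(by rw [List.length_dropLast]; omega)).length :=
        hrows _ (List.getElem_mem _)
      rwa [List.getElem_dropLast] at h8
    · rw [if_neg h100]
      unfold pvCnt
      rw [if_neg h100]
  simp only [pvStepA]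
  rw [hc, hgetk]
  simp only [Int.toNat_natCast]
  unfold pvSpecUpTo
  rw [List.drop_eq_getElem_cons hk,
      List.set_append, if_neg (by rw [hPlen]; omega), hPlen, Nat.sub_self, List.set_cons_zero,
      List.take_add_one, List.getElem?_eq_getElem hk]
  simp only [Option.toList_some]
  rw [PySem.List.enumerate_append, List.map_append]
  simp [PySem.List.enumerate_cons, PySem.List.enumerate_nil, List.length_take,
    min_eq_left (le_of_lt hk), List.append_assoc]

-- invariant of A's outer loop
lemma A_inv (lst : List (List Int)) (hpre : Pre_close_held_open_rate lst) :
    ∀ k : Nat, k ≤ lst.length →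
      (PySem.List.pyRange 0 (k : Int) 1).foldl pvStepA lst = pvSpecUpTo lst k := by
  intro k
  induction k with
  | zero => intro _; simp [pvSpecUpTo, PySem.List.pyRange_one_eq_nil, PySem.List.enumerate_nil]
  | succ k ih =>
    intro h
    rw [show ((k + 1 : Nat) : Int) = (k : Int) + 1 by push_cast; ring,
        PySem.List.pyRange_one_succ_right (by positivity), List.foldl_append,
        ih (by omega)]
    simp only [List.foldl_cons, List.foldl_nil]
    exact pvStepA_spec lst hpre k (by omega)

lemma A_eq_spec (lst : List (List Int)) (h : Pre_close_held_open_rate lst) :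
    close_held_open_rate lst = pvSpecList lst := by
  rw [A_unfold, A_inv lst h lst.length le_rfl]
  unfold pvSpecUpTo pvSpecList
  simp

lemma B_eq_spec (lst : List (List Int)) :
    close_held_open_rate_alt lst = pvSpecList lst := by
  simp only [close_held_open_rate_alt, pvSpecList]
  by_cases h : (100 : Int) < (lst.length : Int)
  · simp only [h, if_true, pv_sums_char, pv_sums_eq lst (by exact_mod_cast h)]
    apply List.map_congr_left
    intro p hp
    rw [PySem.List.mem_enumerate_iff] at hp
    obtain ⟨k, hkl, rfl⟩ := hp
    dsimp only
    simp only [zero_add]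
    refine congrArg (fun z => lst[k] ++ [z]) ?_
    by_cases h100 : (100 : Int) ≤ (k : Int)
    · have hk100 : 100 ≤ k := by exact_mod_cast h100
      have hg : ∀ m : Nat, m < lst.length →
          PySem.List.pyGetD ((List.range lst.length).map
            (fun k => ((lst.dropLast.take k).map pvFlag).sum)) (m : Int) 0
          = ((lst.dropLast.take m).map pvFlag).sum := by
        intro m hm
        rw [PySem.List.pyGetD_eq_getElem _ _ (by positivity)
              (by simp; exact_mod_cast hm)]
        simp [List.getElem_map, List.getElem_range]
      rw [if_pos h100, hg k hkl,
          show ((k : Int) - 100) = (((k - 100 : Nat)) : Int) by omega,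
          hg (k - 100) (by omega),
          pv_cnt_eq lst k hk100 hkl]
    · rw [if_neg h100]
      unfold pvCnt
      rw [if_neg h100]
  · simp only [h, if_false]
    apply List.map_congr_left
    intro p hp
    rw [PySem.List.mem_enumerate_iff] at hp
    obtain ⟨k, hkl, rfl⟩ := hp
    dsimp only
    simp only [zero_add]
    have h100 : ¬ (100 : Int) ≤ (k : Int) := by
      push_cast at h ⊢
      omega
    rw [if_neg h100]
    unfold pvCnt
    rw [if_neg h100]

-- ===== VERDICT (by name: the statement is the Claim_ definition above) =====
theorem close_held_open_rate_spec : Claim_equal_close_held_open_rate := by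
  intro lst _ hpre
  unfold Spec_close_held_open_rate
  rw [A_eq_spec lst hpre, B_eq_spec lst]
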